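-- pv_equiv track=rewrite | github.com/icarusdes/verseny_kodok | adventofcode_2024/day21/day21.py | simulate_moves_numeric
-- ===== SOURCE A (Python) =====
-- numeric_keyboard = ["7", "8", "9", "4", "5", "6", "1", "2", "3", "#", "0", "A"]
--
-- def simulate_moves_numeric(start_button, moves):
--     current_index = numeric_keyboard.index(start_button)
--     from_row = current_index // 3
--     from_col = current_index % 3
--     text = ""
--     for move in moves:
--         if move == "v":
--             from_row += 1
--         elif move == "^":
--             from_row -= 1
--         elif move == ">":
--             from_col += 1
--         elif move == "<":
--             from_col -= 1
--         elif move == "A":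
--             text += numeric_keyboard[from_row * 3 + from_col]
--         else:
--             raise ValueError(f"Invalid move {move}")
--     return text
-- ===== SOURCE B (Python) =====
-- numeric_keyboard = ["7", "8", "9", "4", "5", "6", "1", "2", "3", "#", "0", "A"]
--
-- _DELTA = {"v": 3, "^": -3, ">": 1, "<": -1}
--
--
-- def simulate_moves_numeric(start_button, moves):
--     for move in moves:
--         if move not in "v^><A":
--             raise ValueError(f"Invalid move {move}")
--     index = numeric_keyboard.index(start_button)
--     keys = []
--     for segment in moves.split("A")[:-1]:
--         index += sum(_DELTA[c] for c in segment)
--         keys.append(numeric_keyboard[index])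
--     return "".join(keys)
-- ===== Notes on version B (the rewrite author's own statement) =====
-- stated objective: alternative
-- what changed: Replaces A's per-character row/col state machine with a segment decomposition: split the move string on the press key 'A', add each segment's net displacement to a single linear index, and emit one key per segment boundary.
import Mathlib
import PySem

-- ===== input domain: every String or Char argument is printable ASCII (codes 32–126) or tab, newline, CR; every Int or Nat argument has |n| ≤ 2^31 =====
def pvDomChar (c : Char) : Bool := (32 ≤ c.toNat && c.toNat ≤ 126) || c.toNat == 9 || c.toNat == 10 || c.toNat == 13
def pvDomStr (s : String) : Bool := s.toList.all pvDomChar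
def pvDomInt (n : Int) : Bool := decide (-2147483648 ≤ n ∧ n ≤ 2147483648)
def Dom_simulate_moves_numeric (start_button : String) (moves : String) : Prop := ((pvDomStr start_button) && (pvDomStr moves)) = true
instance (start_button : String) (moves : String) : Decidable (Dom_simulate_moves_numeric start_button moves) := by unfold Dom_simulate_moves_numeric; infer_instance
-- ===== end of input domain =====

-- B replaces A's per-character row/col state machine with a segment decomposition: the move
-- string is split on the press key 'A', each segment's net displacement is added to one linear
-- index, and one key is emitted per segment boundary (objective: alternative, same cost).

-- ===== PORT A =====
def numeric_keyboard : List String :=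
  ["7", "8", "9", "4", "5", "6", "1", "2", "3", "#", "0", "A"]

-- the for-loop of A: state (from_row, from_col, text); the invalid-move branch raises
-- ValueError in Python (excluded by Pre_), here it stops and returns the accumulated text
def simAuxA : List Char → Int → Int → List Char → List Char
  | [], _, _, text => text
  | move :: rest, from_row, from_col, text =>
    if move = 'v' then simAuxA rest (from_row + 1) from_col text
    else if move = '^' then simAuxA rest (from_row - 1) from_col text
    else if move = '>' then simAuxA rest from_row (from_col + 1) text
    else if move = '<' then simAuxA rest from_row (from_col - 1) text
    else if move = 'A' then
      simAuxA rest from_row from_col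
        (text ++ ((PySem.List.pyGet? numeric_keyboard (from_row * 3 + from_col)).getD "").toList)
    else text

def simulate_moves_numeric (start_button : String) (moves : String) : String :=
  -- .index raises ValueError when start_button is absent (excluded by Pre_): getD 0 there
  String.ofList (simAuxA moves.toList
    (PySem.Int.floordiv (((PySem.List.index? numeric_keyboard start_button).getD 0 : Nat) : Int) 3)
    (PySem.Int.mod (((PySem.List.index? numeric_keyboard start_button).getD 0 : Nat) : Int) 3) [])

-- ===== PORT B =====
def moveDelta (move : Char) : Int :=
  if move = 'v' then 3 else if move = '^' then -3
  else if move = '>' then 1 else if move = '<' then -1 else 0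

-- the segment loop of B: one net displacement and one emitted key per segment
def segLoopB : List (List Char) → Int → List Char → List Char
  | [], _, keys => keys
  | seg :: rest, index, keys =>
    segLoopB rest (index + (seg.map moveDelta).sum)
      (keys ++ ((PySem.List.pyGet? numeric_keyboard (index + (seg.map moveDelta).sum)).getD "").toList)

def simulate_moves_numeric_alt (start_button : String) (moves : String) : String :=
  -- the validation loop raises ValueError on an invalid move (excluded by Pre_): "" here
  if moves.toList.all (fun c => c ∈ ("v^><A" : String).toList) then
    String.ofList (segLoopB ((moves.toList.splitOn 'A').dropLast)
      (((PySem.List.index? numeric_keyboard start_button).getD 0 : Nat) : Int) [])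
  else ""

-- ===== PRECONDITION & SPEC =====
-- Pre_ excludes exactly the inputs on which A raises: a start_button not on the keypad
-- (ValueError from .index), a move outside v^><A (explicit ValueError), and an 'A' press whose
-- linear position falls outside Python's index range -12..11 (IndexError).
def Pre_simulate_moves_numeric (start_button : String) (moves : String) : Prop :=
  start_button ∈ numeric_keyboard ∧
  ∀ k ∈ List.range moves.toList.length,
    moves.toList.getD k ' ' ∈ (['v', '^', '>', '<', 'A'] : List Char) ∧
    (moves.toList.getD k ' ' = 'A' →
      -12 ≤ (((PySem.List.index? numeric_keyboard start_button).getD 0 : Nat) : Int)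
              + ((moves.toList.take k).map moveDelta).sum ∧
      (((PySem.List.index? numeric_keyboard start_button).getD 0 : Nat) : Int)
              + ((moves.toList.take k).map moveDelta).sum < 12)
instance (start_button : String) (moves : String) : Decidable (Pre_simulate_moves_numeric start_button moves) := by
  unfold Pre_simulate_moves_numeric; infer_instance

def pvWitness_simulate_moves_numeric : String × String := ("A", "^^<AvA")

def Spec_simulate_moves_numeric (start_button : String) (moves : String) (out : String) : Prop := out = simulate_moves_numeric_alt start_button moves
instance (start_button : String) (moves : String) (out : String) : Decidable (Spec_simulate_moves_numeric start_button moves out) := by unfold Spec_simulate_moves_numeric; infer_instance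

-- ===== CLAIM (what is proved, stated in full; the proofs are below) =====
def Claim_equal_simulate_moves_numeric : Prop := ∀ (start_button : String) (moves : String), Dom_simulate_moves_numeric start_button moves → Pre_simulate_moves_numeric start_button moves → Spec_simulate_moves_numeric start_button moves (simulate_moves_numeric start_button moves)

-- ===== LEMMAS AND PROOFS =====

-- accumulator lemma for B's segment loop
lemma segLoopB_acc (segs : List (List Char)) : ∀ (i : Int) (acc : List Char),
    segLoopB segs i acc = acc ++ segLoopB segs i [] := by
  induction segs with
  | nil => intro i acc; simp [segLoopB]
  | cons s rest ih =>
    intro i acc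
    rw [segLoopB, segLoopB, ih, ih (i + _) (_ ++ _)]
    simp

-- absorbing one leading move of the first segment into the index
lemma segLoopB_cons_delta (m : Char) (s : List Char) (tl : List (List Char)) (i : Int)
    (acc : List Char) :
    segLoopB ((m :: s) :: tl) i acc = segLoopB (s :: tl) (i + moveDelta m) acc := by
  simp [segLoopB, add_assoc]

-- the loop of A equals B's segment loop over splitOn 'A', for any state with from_row*3+from_col = i
lemma simAuxA_eq (l : List Char) :
    ∀ (from_row from_col : Int) (text : List Char),
    (∀ x ∈ l, x ∈ (['v', '^', '>', '<', 'A'] : List Char)) →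
    simAuxA l from_row from_col text =
      text ++ segLoopB ((l.splitOn 'A').dropLast) (from_row * 3 + from_col) [] := by
  induction l with
  | nil => intro r c t _; simp [simAuxA, segLoopB, List.splitOn]
  | cons m rest ih =>
    intro r c t hv
    have hm := hv m (by simp)
    have hv' : ∀ x ∈ rest, x ∈ (['v', '^', '>', '<', 'A'] : List Char) := by
      intro x hx; exact hv x (by simp [hx])
    obtain ⟨h, tl, hsplit⟩ : ∃ h tl, rest.splitOn 'A' = h :: tl := by
      obtain ⟨a, b, hab⟩ := List.exists_cons_of_ne_nil (List.splitOnP_ne_nil (· == 'A') rest)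
      exact ⟨a, b, hab⟩
    fin_cases hm
    · -- 'v'
      rw [show simAuxA ('v' :: rest) r c t = simAuxA rest (r + 1) c t from by simp [simAuxA]]
      rw [ih (r + 1) c t hv']
      have : ('v' :: rest).splitOn 'A' = ('v' :: h) :: tl := by
        rw [List.splitOn, List.splitOnP_cons, if_neg (by decide)]
        simpa [List.splitOn] using congrArg (List.modifyHead (List.cons 'v')) hsplit
      rw [this, hsplit]
      cases tl with
      | nil => simp [segLoopB]
      | cons x xs =>
        rw [List.dropLast_cons₂, List.dropLast_cons₂, segLoopB_cons_delta]
        simp [moveDelta]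
        ring_nf
    · -- '^'
      rw [show simAuxA ('^' :: rest) r c t = simAuxA rest (r - 1) c t from by simp [simAuxA]]
      rw [ih (r - 1) c t hv']
      have : ('^' :: rest).splitOn 'A' = ('^' :: h) :: tl := by
        rw [List.splitOn, List.splitOnP_cons, if_neg (by decide)]
        simpa [List.splitOn] using congrArg (List.modifyHead (List.cons '^')) hsplit
      rw [this, hsplit]
      cases tl with
      | nil => simp [segLoopB]
      | cons x xs =>
        rw [List.dropLast_cons₂, List.dropLast_cons₂, segLoopB_cons_delta]
        simp [moveDelta]
        ring_nf
    · -- '>'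
      rw [show simAuxA ('>' :: rest) r c t = simAuxA rest r (c + 1) t from by simp [simAuxA]]
      rw [ih r (c + 1) t hv']
      have : ('>' :: rest).splitOn 'A' = ('>' :: h) :: tl := by
        rw [List.splitOn, List.splitOnP_cons, if_neg (by decide)]
        simpa [List.splitOn] using congrArg (List.modifyHead (List.cons '>')) hsplit
      rw [this, hsplit]
      cases tl with
      | nil => simp [segLoopB]
      | cons x xs =>
        rw [List.dropLast_cons₂, List.dropLast_cons₂, segLoopB_cons_delta]
        simp [moveDelta]
        ring_nf
    · -- '<'
      rw [show simAuxA ('<' :: rest) r c t = simAuxA rest r (c - 1) t from by simp [simAuxA]]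
      rw [ih r (c - 1) t hv']
      have : ('<' :: rest).splitOn 'A' = ('<' :: h) :: tl := by
        rw [List.splitOn, List.splitOnP_cons, if_neg (by decide)]
        simpa [List.splitOn] using congrArg (List.modifyHead (List.cons '<')) hsplit
      rw [this, hsplit]
      cases tl with
      | nil => simp [segLoopB]
      | cons x xs =>
        rw [List.dropLast_cons₂, List.dropLast_cons₂, segLoopB_cons_delta]
        simp [moveDelta]
        ring_nf
    · -- 'A'
      rw [show simAuxA ('A' :: rest) r c t = simAuxA rest r c
            (t ++ ((PySem.List.pyGet? numeric_keyboard (r * 3 + c)).getD "").toList) from by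
          simp [simAuxA]]
      rw [ih r c _ hv']
      have : ('A' :: rest).splitOn 'A' = [] :: h :: tl := by
        rw [List.splitOn, List.splitOnP_cons, if_pos (by decide)]
        simpa [List.splitOn] using hsplit
      rw [this, hsplit, List.dropLast_cons₂]
      rw [show segLoopB ([] :: (h :: tl).dropLast) (r * 3 + c) [] =
            segLoopB ((h :: tl).dropLast) (r * 3 + c)
              (((PySem.List.pyGet? numeric_keyboard (r * 3 + c)).getD "").toList) from by
        simp [segLoopB]]
      rw [segLoopB_acc ((h :: tl).dropLast) (r * 3 + c)
        (((PySem.List.pyGet? numeric_keyboard (r * 3 + c)).getD "").toList)]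
      simp

-- ===== VERDICT (by name: the statement is the Claim_ definition above) =====
theorem simulate_moves_numeric_spec : Claim_equal_simulate_moves_numeric := by
  intro start_button moves _ hpre
  unfold Spec_simulate_moves_numeric simulate_moves_numeric simulate_moves_numeric_alt
  have hv : ∀ x ∈ moves.toList, x ∈ (['v', '^', '>', '<', 'A'] : List Char) := by
    intro x hx
    obtain ⟨k, hk, rfl⟩ := List.mem_iff_getElem.mp hx
    have h := (hpre.2 k (List.mem_range.mpr hk)).1
    rwa [List.getD_eq_getElem _ _ hk] at h
  rw [if_pos (by
    rw [List.all_eq_true]; intro c hc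
    have h5 : ("v^><A" : String).toList = ['v', '^', '>', '<', 'A'] := rfl
    rw [h5]
    have := hv c hc
    fin_cases this <;> decide)]
  rw [simAuxA_eq _ _ _ _ hv, PySem.Int.floordiv_mul_add_mod]
  simp
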